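-- pv_equiv track=rewrite | github.com/nivan/caminhosDiagonais | util.py | generateFirstPath
-- ===== SOURCE A (Python) =====
-- def normalizeEntry(entry):
--     _min = entry[0]
--     _index = 0
--
--     for i in range(len(entry)):
--         if entry[i] < _min:
--             _min = entry[i]
--             _index = i
--
--     return entry[_index:] + entry[0:_index]
--
-- def generateFirstPath(h):
--     #
--     numNewEntries = 8*h-2
--     first   = [1,2,4*h]
--     seed    = first + [3]
--     result  = [first,seed]
--     counter = 0
--     #
--     for t in range(4*h-4):
--         newEntry = [t for t in result[-1]]
--         if counter % 2 == 0:
--             newEntry[1] = (newEntry[1] + 2)%(4*h)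
--         else:
--             newEntry[3] = (newEntry[3] + 2)%(4*h)
--         result.append(newEntry)
--         counter+=1
--     #
--     mid1 = [1,4*h,4*h-1]
--     result.append(mid1)
--     ##########################
--     #
--     mid2    = [1,4*h,2]
--     result.append(mid2)
--     seed    = mid2 + [4*h-1]
--     result.append(seed)
--     counter = 0
--     for t in range(4*h-4):
--         newEntry = [t for t in result[-1]]
--         if counter % 2 == 0:
--             newEntry[1] = (newEntry[1] - 2)%(4*h)
--         else:
--             newEntry[3] = (newEntry[3] - 2)%(4*h)
--         result.append(newEntry)
--         counter+=1
--
--     #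
--     last = [1,2,3]
--     result.append(last)
--
--     return [normalizeEntry(t) for t in result]
-- ===== SOURCE B (Python) =====
-- def normalizeEntry(entry):
--     _min = entry[0]
--     _index = 0
--
--     for i in range(len(entry)):
--         if entry[i] < _min:
--             _min = entry[i]
--             _index = i
--
--     return entry[_index:] + entry[0:_index]
--
-- def generateFirstPath(h):
--     m = 4*h
--     up   = [[1, (2 + 2*((k+1)//2)) % m, m, (3 + 2*(k//2)) % m] for k in range(1, m-3)]
--     down = [[1, (m - 2*((k+1)//2)) % m, 2, (m-1 - 2*(k//2)) % m] for k in range(1, m-3)]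
--     path = ([[1, 2, m], [1, 2, m, 3]] + up
--             + [[1, m, m-1], [1, m, 2], [1, m, 2, m-1]] + down
--             + [[1, 2, 3]])
--     return [normalizeEntry(t) for t in path]
-- ===== Notes on version B (the rewrite author's own statement) =====
-- stated objective: alternative
-- what changed: Both mutation loops (copy result[-1], alternate which index to bump by a counter parity branch) are replaced by direct per-index closed-form comprehensions computing each entry from its range index with integer division, eliminating the running accumulator state and the parity branch.
import Mathlib
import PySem

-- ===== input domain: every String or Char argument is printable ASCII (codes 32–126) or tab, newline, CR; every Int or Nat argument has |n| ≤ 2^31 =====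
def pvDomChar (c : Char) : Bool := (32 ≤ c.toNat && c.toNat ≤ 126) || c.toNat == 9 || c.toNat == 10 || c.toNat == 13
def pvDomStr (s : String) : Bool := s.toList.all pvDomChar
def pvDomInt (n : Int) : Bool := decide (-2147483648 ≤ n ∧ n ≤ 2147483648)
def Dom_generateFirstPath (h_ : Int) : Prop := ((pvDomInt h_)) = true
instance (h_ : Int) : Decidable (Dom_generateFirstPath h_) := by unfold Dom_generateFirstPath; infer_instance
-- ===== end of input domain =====

-- B replaces A's two stateful copy-and-mutate loops by closed-form per-index comprehensions (alternative decomposition, same cost).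
-- B replaces A's two stateful copy-and-mutate loops by closed-form per-index comprehensions (alternative decomposition, same cost).
-- ===== PORT A =====
def normalizeEntry (entry : List Int) : List Int :=
  -- _min = entry[0]; entries here are never empty, the default of getD is never used
  let st : Int × Int :=
    (PySem.List.pyRange 0 (entry.length : Int) 1).foldl
      (fun (st : Int × Int) i =>
        if PySem.List.pyGetD entry i 0 < st.1 then (PySem.List.pyGetD entry i 0, i) else st)
      ((PySem.List.pyGet? entry 0).getD 0, 0)
  PySem.List.slice entry (some st.2) none ++ PySem.List.slice entry (some 0) (some st.2)

-- the loop body; the result list is carried REVERSED (Python appends at the tail, the port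
-- conses at the head and reverses once at the end), so result[-1] is the head of the accumulator
def pvUpStep (h_ : Int) (st : List (List Int) × Int) (_t : Int) : List (List Int) × Int :=
  let newEntry := (st.1.head?.getD []).map (fun t => t)
  let newEntry :=
    if PySem.Int.mod st.2 2 = 0 then
      PySem.List.pySetD newEntry 1 (PySem.Int.mod (PySem.List.pyGetD newEntry 1 0 + 2) (4*h_))
    else
      PySem.List.pySetD newEntry 3 (PySem.Int.mod (PySem.List.pyGetD newEntry 3 0 + 2) (4*h_))
  (newEntry :: st.1, st.2 + 1)

def pvDownStep (h_ : Int) (st : List (List Int) × Int) (_t : Int) : List (List Int) × Int :=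
  let newEntry := (st.1.head?.getD []).map (fun t => t)
  let newEntry :=
    if PySem.Int.mod st.2 2 = 0 then
      PySem.List.pySetD newEntry 1 (PySem.Int.mod (PySem.List.pyGetD newEntry 1 0 - 2) (4*h_))
    else
      PySem.List.pySetD newEntry 3 (PySem.Int.mod (PySem.List.pyGetD newEntry 3 0 - 2) (4*h_))
  (newEntry :: st.1, st.2 + 1)

def generateFirstPath (h_ : Int) : List (List Int) :=
  let first : List Int := [1, 2, 4*h_]
  let seed := first ++ [3]
  -- result is kept reversed throughout (each Python append is a cons); reversed once at the end
  let result : List (List Int) := [seed, first]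
  let st := (PySem.List.pyRange 0 (4*h_ - 4) 1).foldl (pvUpStep h_) (result, 0)
  let result := [[1, 4*h_, 4*h_ - 1]] ++ st.1
  let mid2 : List Int := [1, 4*h_, 2]
  let result := [mid2] ++ result
  let seed2 := mid2 ++ [4*h_ - 1]
  let result := [seed2] ++ result
  let st2 := (PySem.List.pyRange 0 (4*h_ - 4) 1).foldl (pvDownStep h_) (result, 0)
  let result := [[1, 2, 3]] ++ st2.1
  result.reverse.map normalizeEntry

-- ===== PORT B =====
def pvUpEntry (m k : Int) : List Int :=
  [1, PySem.Int.mod (2 + 2 * PySem.Int.floordiv (k + 1) 2) m, m,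
   PySem.Int.mod (3 + 2 * PySem.Int.floordiv k 2) m]

def pvDnEntry (m k : Int) : List Int :=
  [1, PySem.Int.mod (m - 2 * PySem.Int.floordiv (k + 1) 2) m, 2,
   PySem.Int.mod (m - 1 - 2 * PySem.Int.floordiv k 2) m]

def generateFirstPath_alt (h_ : Int) : List (List Int) :=
  let m := 4*h_
  let up := (PySem.List.pyRange 1 (m - 3) 1).map (pvUpEntry m)
  let down := (PySem.List.pyRange 1 (m - 3) 1).map (pvDnEntry m)
  let path := [[1, 2, m], [1, 2, m, 3]] ++ up
      ++ [[1, m, m - 1], [1, m, 2], [1, m, 2, m - 1]] ++ down ++ [[1, 2, 3]]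
  path.map normalizeEntry

-- ===== PRECONDITION & SPEC =====
def Spec_generateFirstPath (h_ : Int) (out : List (List Int)) : Prop := out = generateFirstPath_alt h_
instance (h_ : Int) (out : List (List Int)) : Decidable (Spec_generateFirstPath h_ out) := by unfold Spec_generateFirstPath; infer_instance

-- ===== CLAIM (what is proved, stated in full; the proofs are below) =====
def Claim_equal_generateFirstPath : Prop := ∀ (h_ : Int), Dom_generateFirstPath h_ → Spec_generateFirstPath h_ (generateFirstPath h_)

-- ===== LEMMAS AND PROOFS =====
-- closed-form entries, indexed by a Nat; all components already lie in [0, 4h), so A's mod is the identity on them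
def fUp (m : Int) (k : Nat) : List Int :=
  [1, 2 + 2 * (((k + 1) / 2 : Nat) : Int), m, 3 + 2 * ((k / 2 : Nat) : Int)]
def fDn (m : Int) (k : Nat) : List Int :=
  [1, m - 2 * (((k + 1) / 2 : Nat) : Int), 2, m - 1 - 2 * ((k / 2 : Nat) : Int)]

lemma pv_mod_id (a m : Int) (h0 : 0 ≤ a) (h1 : a < m) : PySem.Int.mod a m = a := by
  rw [PySem.Int.mod_eq_emod_of_pos (by omega)]
  exact Int.emod_eq_of_lt h0 h1

lemma upStep_eq (h_ : Int) (R : List (List Int)) (j : Nat)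
    (hj : (j : Int) < 4*h_ - 4) (t : Int) :
    pvUpStep h_ (fUp (4*h_) j :: R, (j : Int)) t
      = (fUp (4*h_) (j + 1) :: fUp (4*h_) j :: R, (j : Int) + 1) := by
  unfold pvUpStep
  simp only [List.head?_cons, Option.getD_some, List.map_id_fun', id]
  rcases Nat.mod_two_eq_zero_or_one j with hpar | hpar
  · have h2 : PySem.Int.mod (j : Int) 2 = 0 := by
      rw [PySem.Int.mod_eq_emod_of_pos (by omega)]; omega
    rw [if_pos h2]
    have e1 : PySem.List.pyGetD (fUp (4*h_) j) 1 0 = 2 + 2 * (((j + 1) / 2 : Nat) : Int) := by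
      simp [fUp, PySem.List.pyGetD, PySem.List.pyGet?, PySem.List.pyIdx?]
    rw [e1, pv_mod_id _ _ (by omega) (by omega)]
    have e2 : PySem.List.pySetD (fUp (4*h_) j) 1 (2 + 2 * (((j + 1) / 2 : Nat) : Int) + 2)
        = fUp (4*h_) (j + 1) := by
      simp only [fUp, PySem.List.pySetD, PySem.List.pySet?, PySem.List.pyIdx?,
        show ((1:Int)).toNat = 1 from rfl]
      norm_num
      constructor <;> omega
    rw [e2]
  · have h2 : ¬ PySem.Int.mod (j : Int) 2 = 0 := by
      rw [PySem.Int.mod_eq_emod_of_pos (by omega)]; omega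
    rw [if_neg h2]
    have e1 : PySem.List.pyGetD (fUp (4*h_) j) 3 0 = 3 + 2 * ((j / 2 : Nat) : Int) := by
      simp [fUp, PySem.List.pyGetD, PySem.List.pyGet?, PySem.List.pyIdx?]
    rw [e1, pv_mod_id _ _ (by omega) (by omega)]
    have e2 : PySem.List.pySetD (fUp (4*h_) j) 3 (3 + 2 * ((j / 2 : Nat) : Int) + 2)
        = fUp (4*h_) (j + 1) := by
      simp only [fUp, PySem.List.pySetD, PySem.List.pySet?, PySem.List.pyIdx?,
        show ((3:Int)).toNat = 3 from rfl]
      norm_num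
      constructor <;> omega
    rw [e2]

lemma dnStep_eq (h_ : Int) (R : List (List Int)) (j : Nat)
    (hj : (j : Int) < 4*h_ - 4) (t : Int) :
    pvDownStep h_ (fDn (4*h_) j :: R, (j : Int)) t
      = (fDn (4*h_) (j + 1) :: fDn (4*h_) j :: R, (j : Int) + 1) := by
  unfold pvDownStep
  simp only [List.head?_cons, Option.getD_some, List.map_id_fun', id]
  rcases Nat.mod_two_eq_zero_or_one j with hpar | hpar
  · have h2 : PySem.Int.mod (j : Int) 2 = 0 := by
      rw [PySem.Int.mod_eq_emod_of_pos (by omega)]; omega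
    rw [if_pos h2]
    have e1 : PySem.List.pyGetD (fDn (4*h_) j) 1 0 = 4*h_ - 2 * (((j + 1) / 2 : Nat) : Int) := by
      simp [fDn, PySem.List.pyGetD, PySem.List.pyGet?, PySem.List.pyIdx?]
    rw [e1, pv_mod_id _ _ (by omega) (by omega)]
    have e2 : PySem.List.pySetD (fDn (4*h_) j) 1 (4*h_ - 2 * (((j + 1) / 2 : Nat) : Int) - 2)
        = fDn (4*h_) (j + 1) := by
      simp only [fDn, PySem.List.pySetD, PySem.List.pySet?, PySem.List.pyIdx?,
        show ((1:Int)).toNat = 1 from rfl]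
      norm_num
      constructor <;> omega
    rw [e2]
  · have h2 : ¬ PySem.Int.mod (j : Int) 2 = 0 := by
      rw [PySem.Int.mod_eq_emod_of_pos (by omega)]; omega
    rw [if_neg h2]
    have e1 : PySem.List.pyGetD (fDn (4*h_) j) 3 0 = 4*h_ - 1 - 2 * ((j / 2 : Nat) : Int) := by
      simp [fDn, PySem.List.pyGetD, PySem.List.pyGet?, PySem.List.pyIdx?]
    rw [e1, pv_mod_id _ _ (by omega) (by omega)]
    have e2 : PySem.List.pySetD (fDn (4*h_) j) 3 (4*h_ - 1 - 2 * ((j / 2 : Nat) : Int) - 2)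
        = fDn (4*h_) (j + 1) := by
      simp only [fDn, PySem.List.pySetD, PySem.List.pySet?, PySem.List.pyIdx?,
        show ((3:Int)).toNat = 3 from rfl]
      norm_num
      constructor <;> omega
    rw [e2]

lemma rev_map_range_succ {α : Type} (f : Nat → α) (j : Nat) :
    ((List.range (j+1)).map f).reverse = f j :: ((List.range j).map f).reverse := by
  simp [List.range_succ]

lemma upFold (h_ : Int) (R0 : List (List Int)) :
    ∀ (l : List Int) (j : Nat), (j : Int) + l.length ≤ 4*h_ - 4 →
      l.foldl (pvUpStep h_) (((List.range (j+1)).map (fUp (4*h_))).reverse ++ R0, (j : Int))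
        = (((List.range (j + 1 + l.length)).map (fUp (4*h_))).reverse ++ R0,
            ((j + l.length : Nat) : Int)) := by
  intro l
  induction l with
  | nil => intro j hj; simp
  | cons x xs ih =>
    intro j hj
    rw [List.foldl_cons, rev_map_range_succ, List.cons_append]
    rw [upStep_eq h_ _ j (by simp at hj ⊢; omega) x]
    rw [show fUp (4*h_) (j+1) :: fUp (4*h_) j :: (((List.range j).map (fUp (4*h_))).reverse ++ R0)
        = ((List.range (j+1+1)).map (fUp (4*h_))).reverse ++ R0 by
      rw [rev_map_range_succ, rev_map_range_succ]; simp]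
    rw [show ((j : Int) + 1) = ((j + 1 : Nat) : Int) by push_cast; ring]
    rw [ih (j+1) (by simp at hj ⊢; omega)]
    simp only [List.length_cons]
    rw [show j + 1 + 1 + xs.length = j + 1 + (xs.length + 1) from by omega,
        show j + 1 + xs.length = j + (xs.length + 1) from by omega]

lemma dnFold (h_ : Int) (R0 : List (List Int)) :
    ∀ (l : List Int) (j : Nat), (j : Int) + l.length ≤ 4*h_ - 4 →
      l.foldl (pvDownStep h_) (((List.range (j+1)).map (fDn (4*h_))).reverse ++ R0, (j : Int))
        = (((List.range (j + 1 + l.length)).map (fDn (4*h_))).reverse ++ R0,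
            ((j + l.length : Nat) : Int)) := by
  intro l
  induction l with
  | nil => intro j hj; simp
  | cons x xs ih =>
    intro j hj
    rw [List.foldl_cons, rev_map_range_succ, List.cons_append]
    rw [dnStep_eq h_ _ j (by simp at hj ⊢; omega) x]
    rw [show fDn (4*h_) (j+1) :: fDn (4*h_) j :: (((List.range j).map (fDn (4*h_))).reverse ++ R0)
        = ((List.range (j+1+1)).map (fDn (4*h_))).reverse ++ R0 by
      rw [rev_map_range_succ, rev_map_range_succ]; simp]
    rw [show ((j : Int) + 1) = ((j + 1 : Nat) : Int) by push_cast; ring]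
    rw [ih (j+1) (by simp at hj ⊢; omega)]
    simp only [List.length_cons]
    rw [show j + 1 + 1 + xs.length = j + 1 + (xs.length + 1) from by omega,
        show j + 1 + xs.length = j + (xs.length + 1) from by omega]

lemma fUp_zero (m : Int) : fUp m 0 = [1, 2, m, 3] := by norm_num [fUp]

lemma fDn_zero (m : Int) : fDn m 0 = [1, m, 2, m - 1] := by norm_num [fDn]

lemma upEntry_eq (h_ : Int) (k : Nat) (hk : (k : Int) < 4*h_ - 4) :
    pvUpEntry (4*h_) (1 + (k : Int)) = fUp (4*h_) (k + 1) := by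
  unfold pvUpEntry fUp
  rw [PySem.Int.floordiv_eq_ediv_of_pos (by omega), PySem.Int.floordiv_eq_ediv_of_pos (by omega)]
  rw [pv_mod_id _ _ (by omega) (by omega), pv_mod_id _ _ (by omega) (by omega)]
  norm_num
  constructor <;> omega

lemma dnEntry_eq (h_ : Int) (k : Nat) (hk : (k : Int) < 4*h_ - 4) :
    pvDnEntry (4*h_) (1 + (k : Int)) = fDn (4*h_) (k + 1) := by
  unfold pvDnEntry fDn
  rw [PySem.Int.floordiv_eq_ediv_of_pos (by omega), PySem.Int.floordiv_eq_ediv_of_pos (by omega)]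
  rw [pv_mod_id _ _ (by omega) (by omega), pv_mod_id _ _ (by omega) (by omega)]
  norm_num
  constructor <;> omega

lemma B_up (h_ : Int) (hm : 8 ≤ 4*h_) :
    (PySem.List.pyRange 1 (4*h_ - 3) 1).map (pvUpEntry (4*h_))
      = (List.range ((4*h_ - 4).toNat)).map (fun k => fUp (4*h_) (k + 1)) := by
  rw [PySem.List.pyRange_one, List.map_map]
  rw [show (4*h_ - 3 - 1).toNat = (4*h_ - 4).toNat from by omega]
  apply List.map_congr_left
  intro k hk
  simp only [List.mem_range] at hk
  exact upEntry_eq h_ k (by omega)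

lemma B_dn (h_ : Int) (hm : 8 ≤ 4*h_) :
    (PySem.List.pyRange 1 (4*h_ - 3) 1).map (pvDnEntry (4*h_))
      = (List.range ((4*h_ - 4).toNat)).map (fun k => fDn (4*h_) (k + 1)) := by
  rw [PySem.List.pyRange_one, List.map_map]
  rw [show (4*h_ - 3 - 1).toNat = (4*h_ - 4).toNat from by omega]
  apply List.map_congr_left
  intro k hk
  simp only [List.mem_range] at hk
  exact dnEntry_eq h_ k (by omega)

lemma range_succ_map_shift {α : Type} (f : Nat → α) (n : Nat) :
    (List.range (1 + n)).map f = f 0 :: (List.range n).map (fun k => f (k + 1)) := by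
  rw [Nat.add_comm, List.range_succ_eq_map, List.map_cons, List.map_map]
  rfl

lemma foldA_up (h_ : Int) (hm : 8 ≤ 4*h_) :
    (PySem.List.pyRange 0 (4*h_ - 4) 1).foldl (pvUpStep h_)
        ([[1, 2, 4*h_, 3], [1, 2, 4*h_]], 0)
      = (((List.range (1 + (4*h_ - 4).toNat)).map (fUp (4*h_))).reverse ++ [[1, 2, 4*h_]],
          (((4*h_ - 4).toNat : Nat) : Int)) := by
  have hlen : ((PySem.List.pyRange 0 (4*h_ - 4) 1).length : Nat) = (4*h_ - 4).toNat := by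
    rw [PySem.List.length_pyRange_one]; omega
  have h0 := upFold h_ [[1, 2, 4*h_]] (PySem.List.pyRange 0 (4*h_ - 4) 1) 0
    (by rw [hlen]; omega)
  rw [hlen] at h0
  simpa [fUp_zero] using h0

lemma foldA_dn (h_ : Int) (hm : 8 ≤ 4*h_) (R : List (List Int)) :
    (PySem.List.pyRange 0 (4*h_ - 4) 1).foldl (pvDownStep h_)
        ([[1, 4*h_, 2, 4*h_ - 1]] ++ R, 0)
      = (((List.range (1 + (4*h_ - 4).toNat)).map (fDn (4*h_))).reverse ++ R,
          (((4*h_ - 4).toNat : Nat) : Int)) := by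
  have hlen : ((PySem.List.pyRange 0 (4*h_ - 4) 1).length : Nat) = (4*h_ - 4).toNat := by
    rw [PySem.List.length_pyRange_one]; omega
  have h0 := dnFold h_ R (PySem.List.pyRange 0 (4*h_ - 4) 1) 0
    (by rw [hlen]; omega)
  rw [hlen] at h0
  simpa [fDn_zero] using h0

-- ===== VERDICT (by name: the statement is the Claim_ definition above) =====
theorem generateFirstPath_spec : Claim_equal_generateFirstPath := by
  intro h_ _
  unfold Spec_generateFirstPath generateFirstPath generateFirstPath_alt
  by_cases hh : h_ ≤ 1
  · have h1 : PySem.List.pyRange 0 (4*h_ - 4) 1 = [] := PySem.List.pyRange_one_eq_nil (by omega)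
    have h2 : PySem.List.pyRange 1 (4*h_ - 3) 1 = [] := PySem.List.pyRange_one_eq_nil (by omega)
    simp [h1, h2]
  · have hm : 8 ≤ 4*h_ := by omega
    show (([[1, 2, 3]]
          ++ ((PySem.List.pyRange 0 (4*h_ - 4) 1).foldl (pvDownStep h_)
              ([[1, 4*h_, 2, 4*h_ - 1]]
                ++ ([[1, 4*h_, 2]]
                  ++ ([[1, 4*h_, 4*h_ - 1]]
                    ++ ((PySem.List.pyRange 0 (4*h_ - 4) 1).foldl (pvUpStep h_)
                        ([[1, 2, 4*h_, 3], [1, 2, 4*h_]], 0)).1)), 0)).1).reverse).map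
        normalizeEntry
      = List.map normalizeEntry
          ([[1, 2, 4*h_], [1, 2, 4*h_, 3]]
            ++ (PySem.List.pyRange 1 (4*h_ - 3) 1).map (pvUpEntry (4*h_))
            ++ [[1, 4*h_, 4*h_ - 1], [1, 4*h_, 2], [1, 4*h_, 2, 4*h_ - 1]]
            ++ (PySem.List.pyRange 1 (4*h_ - 3) 1).map (pvDnEntry (4*h_)) ++ [[1, 2, 3]])
    rw [foldA_up h_ hm]
    rw [foldA_dn h_ hm]
    rw [B_up h_ hm, B_dn h_ hm]
    simp [range_succ_map_shift (fUp (4*h_)) ((4*h_ - 4).toNat),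
          range_succ_map_shift (fDn (4*h_)) ((4*h_ - 4).toNat), fUp_zero, fDn_zero]
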